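-- pv_equiv track=rewrite | github.com/PraharshitaK-IS/LeetCode | Leetcode /027_LC_6_Zigzag_Conversion_Practice_1.py | convert
-- ===== SOURCE A (Python) =====
-- def convert(s: str, numRows: int) -> str:
--     if numRows == 1 or numRows >= len(s):
--         return s  # Edge case: no zigzag needed
--
--     rows = [''] * numRows
--     current_row = 0
--     going_down = False
--
--     for c in s:
--         rows[current_row] += c
--         # Change direction at the top or bottom
--         if current_row == 0 or current_row == numRows - 1:
--             going_down = not going_down
--         current_row += 1 if going_down else -1
--
--     return ''.join(rows)
-- ===== SOURCE B (Python) =====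
-- def convert(s: str, numRows: int) -> str:
--     if numRows == 1 or numRows >= len(s):
--         return s  # Edge case: no zigzag needed
--
--     cycle = 2 * numRows - 2
--     rows = [[] for _ in range(numRows)]
--     for i, c in enumerate(s):
--         m = i % cycle
--         rows[m if m < numRows else cycle - m].append(c)
--     return ''.join(c for row in rows for c in row)
-- ===== Notes on version B (the rewrite author's own statement) =====
-- stated objective: simpler
-- what changed: Replaces A's sequential state machine (current_row plus a going_down direction flag flipped at the boundaries) with a stateless closed-form row index i % cycle (folded back past numRows) computed independently for each character.
import Mathlib
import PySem

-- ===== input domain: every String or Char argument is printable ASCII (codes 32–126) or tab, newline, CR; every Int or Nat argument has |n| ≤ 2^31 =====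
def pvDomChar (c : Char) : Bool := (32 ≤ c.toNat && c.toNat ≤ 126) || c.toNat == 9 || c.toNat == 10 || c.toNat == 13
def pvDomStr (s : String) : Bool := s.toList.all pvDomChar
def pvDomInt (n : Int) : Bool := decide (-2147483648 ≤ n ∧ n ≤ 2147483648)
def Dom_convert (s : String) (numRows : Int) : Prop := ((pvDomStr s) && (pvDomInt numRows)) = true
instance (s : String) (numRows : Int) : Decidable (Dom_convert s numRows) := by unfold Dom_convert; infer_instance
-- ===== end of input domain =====

-- B replaces A's sequential walk with a direction flag and current-row state by a stateless
-- closed-form row index i % cycle (folded back past numRows) — objective: simpler/alternative.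

-- ===== PORT A =====
-- row buffers are ported as List Char (PySem models Python str contents as code points);
-- rows[i] += c: exact for 0 ≤ i < len rows (Python raises IndexError / wraps a negative index
-- otherwise; inside Pre_convert the index is always in range)
def pyAppendAt (rows : List (List Char)) (i : Int) (c : Char) : List (List Char) :=
  if 0 ≤ i then rows.modify i.toNat (· ++ [c]) else rows

def convertWalk (cs : List Char) (numRows : Int) (rows : List (List Char)) (cur : Int) (down : Bool) :
    List (List Char) :=
  match cs with
  | [] => rows
  | c :: rest =>
    let rows' := pyAppendAt rows cur c
    let down' := if cur = 0 ∨ cur = numRows - 1 then !down else down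
    let cur' := cur + (if down' then 1 else -1)
    convertWalk rest numRows rows' cur' down'

def convert (s : String) (numRows : Int) : String :=
  if numRows = 1 ∨ numRows ≥ PySem.Str.len s then s
  else
    String.ofList (convertWalk s.toList numRows (List.replicate numRows.toNat []) 0 false).flatten

-- ===== PORT B =====
def convertZig (cs : List Char) (i : Int) (cycle numRows : Int) (rows : List (List Char)) :
    List (List Char) :=
  match cs with
  | [] => rows
  | c :: rest =>
    let m := PySem.Int.mod i cycle
    convertZig rest (i + 1) cycle numRows
      (pyAppendAt rows (if m < numRows then m else cycle - m) c)

def convert_alt (s : String) (numRows : Int) : String :=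
  if numRows = 1 ∨ numRows ≥ PySem.Str.len s then s
  else
    let cycle := 2 * numRows - 2
    String.ofList (convertZig s.toList 0 cycle numRows (List.replicate numRows.toNat [])).flatten

-- ===== PRECONDITION & SPEC =====
-- Pre_ excludes exactly the inputs where A raises IndexError (numRows ≤ 0 with a non-empty s:
-- `rows` is empty, so `rows[current_row]` fails); B raises on exactly the same inputs.
def Pre_convert (s : String) (numRows : Int) : Prop := 1 ≤ numRows ∨ s = ""
instance (s : String) (numRows : Int) : Decidable (Pre_convert s numRows) := by
  unfold Pre_convert; infer_instance

def pvWitness_convert : String × Int := ("PAYPALISHIRING", 3)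

def Spec_convert (s : String) (numRows : Int) (out : String) : Prop := out = convert_alt s numRows
instance (s : String) (numRows : Int) (out : String) : Decidable (Spec_convert s numRows out) := by
  unfold Spec_convert; infer_instance

-- ===== CLAIM (what is proved, stated in full; the proofs are below) =====
def Claim_equal_convert : Prop := ∀ (s : String) (numRows : Int),
  Dom_convert s numRows → Pre_convert s numRows → Spec_convert s numRows (convert s numRows)

-- ===== LEMMAS AND PROOFS =====

-- the row A's walk is at before processing character k, and the direction flag there
def rowAt (R k : Int) : Int :=
  let m := PySem.Int.mod k (2 * R - 2)
  if m < R then m else (2 * R - 2) - m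

def dirAt (R k : Int) : Bool :=
  let m := PySem.Int.mod k (2 * R - 2)
  decide (1 ≤ m ∧ m ≤ R - 1)

lemma mod_succ_char (c k : Int) (hc : 1 < c) :
    PySem.Int.mod (k + 1) c =
      if PySem.Int.mod k c = c - 1 then 0 else PySem.Int.mod k c + 1 := by
  have hme : PySem.Int.mod k c = k % c := PySem.Int.mod_eq_emod_of_pos (by omega)
  have hm : 0 ≤ k % c := Int.emod_nonneg k (by omega)
  have hl : k % c < c := Int.emod_lt_of_pos k (by omega)
  rw [PySem.Int.mod_eq_emod_of_pos (a := k + 1) (by omega), hme]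
  rw [Int.add_emod, Int.emod_eq_of_lt (by omega) (by omega : (1:Int) < c)]
  split_ifs with h
  · rw [h, show c - 1 + 1 = c by ring, Int.emod_self]
  · exact Int.emod_eq_of_lt (by omega) (by omega)

lemma walk_step (R k : Int) (hR : 2 ≤ R) :
    ((if rowAt R k = 0 ∨ rowAt R k = R - 1 then !dirAt R k else dirAt R k) = dirAt R (k + 1)) ∧
    (rowAt R k + (if dirAt R (k + 1) then 1 else -1) = rowAt R (k + 1)) := by
  have hc : (1:Int) < 2 * R - 2 := by omega
  have hm := PySem.Int.mod_nonneg (a := k) (b := 2 * R - 2) (by omega)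
  have hl := PySem.Int.mod_lt (a := k) (b := 2 * R - 2) (by omega)
  have hs := mod_succ_char (2 * R - 2) k hc
  unfold rowAt dirAt
  simp only [hs]
  constructor <;>
    split_ifs <;>
      (try simp only [← decide_not, decide_eq_decide]) <;>
        (try simp only [decide_eq_true_eq] at *) <;>
          omega

lemma walk_eq_zig (R : Int) (hR : 2 ≤ R) (cs : List Char) (k : Int) (hk : 0 ≤ k)
    (rows : List (List Char)) :
    convertWalk cs R rows (rowAt R k) (dirAt R k) = convertZig cs k (2 * R - 2) R rows := by
  induction cs generalizing k rows with
  | nil => rfl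
  | cons c rest ih =>
    obtain ⟨hdir, hcur⟩ := walk_step R k hR
    show convertWalk rest R (pyAppendAt rows (rowAt R k) c) _ _ = _
    unfold convertZig
    simp only
    have hidx : (if PySem.Int.mod k (2 * R - 2) < R then PySem.Int.mod k (2 * R - 2)
        else 2 * R - 2 - PySem.Int.mod k (2 * R - 2)) = rowAt R k := rfl
    rw [hidx, hdir, hcur]
    exact ih (k + 1) (by omega) _

lemma rowAt_zero (R : Int) (hR : 2 ≤ R) : rowAt R 0 = 0 := by
  unfold rowAt
  rw [PySem.Int.mod_eq_emod_of_pos (by omega), Int.zero_emod]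
  simp only [if_pos (by omega : (0:Int) < R)]

lemma dirAt_zero (R : Int) (hR : 2 ≤ R) : dirAt R 0 = false := by
  unfold dirAt
  rw [PySem.Int.mod_eq_emod_of_pos (by omega), Int.zero_emod]
  simp

-- ===== VERDICT (by name: the statement is the Claim_ definition above) =====
theorem convert_spec : Claim_equal_convert := by
  intro s numRows _ hpre
  unfold Spec_convert convert convert_alt
  split_ifs with hguard
  · rfl
  · simp only
    rw [not_or] at hguard
    obtain ⟨hg1, hg2⟩ := hguard
    cases hls : s.toList with
    | nil => rfl
    | cons a l =>
      have hR : 2 ≤ numRows := by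
        rcases hpre with h1 | h1
        · have hlen : 1 ≤ PySem.Str.len s := by
            simp only [PySem.Str.len_eq, hls]
            simp
          omega
        · subst h1; simp at hls
      have := walk_eq_zig numRows hR s.toList 0 (le_refl 0) (List.replicate numRows.toNat [])
      rw [rowAt_zero numRows hR, dirAt_zero numRows hR, hls] at this
      rw [this]
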